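-- pv_equiv track=rewrite | github.com/i9wa4/dotfiles | bin/confluence-to-md.py | ensure_table_spacing
-- ===== SOURCE A (Python) =====
-- def ensure_table_spacing(md: str) -> str:
--     """Ensure proper spacing around tables."""
--     lines = md.splitlines()
--     result = []
--     i = 0
--     while i < len(lines):
--         line = lines[i]
--         if line.strip().startswith("|") and "|" in line:
--             while result and result[-1] == "":
--                 result.pop()
--             if result:
--                 result.append("")
--             while i < len(lines) and lines[i].strip().startswith("|"):
--                 result.append(lines[i])
--                 i += 1
--             while result and result[-1] == "":
--                 result.pop()
--             if i < len(lines):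
--                 result.append("")
--             continue
--         if line.strip() == "":
--             if not result or result[-1] != "":
--                 result.append("")
--         else:
--             result.append(line)
--         i += 1
--     while result and result[-1] == "":
--         result.pop()
--     return "\n".join(result)
-- ===== SOURCE B (Python) =====
-- def ensure_table_spacing(md: str) -> str:
--     """Ensure proper spacing around tables (classify-then-emit with a pending-blank flag)."""
--     lines = md.splitlines()
--     is_table = [ln.strip().startswith("|") for ln in lines]
--     n = len(lines)
--     out = []
--     pending = False  # a blank line is owed before the next emitted content
--     i = 0
--     while i < n:
--         if is_table[i]:
--             if out:
--                 out.append("")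
--             j = i
--             while j < n and is_table[j]:
--                 out.append(lines[j])
--                 j += 1
--             pending = True
--             i = j
--         elif lines[i].strip() == "":
--             pending = True
--             i += 1
--         else:
--             if pending:
--                 out.append("")
--                 pending = False
--             out.append(lines[i])
--             i += 1
--     return "\n".join(out)
-- ===== Notes on version B (the rewrite author's own statement) =====
-- stated objective: alternative
-- what changed: Replaces A's append-then-pop blank splicing (pushing blanks into the result and repeatedly popping them back off) with a classify-then-emit pass: table flags are precomputed per line, maximal table runs are grouped, and a single pending-blank flag records an owed separator instead of materialising and removing blanks.
import Mathlib
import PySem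

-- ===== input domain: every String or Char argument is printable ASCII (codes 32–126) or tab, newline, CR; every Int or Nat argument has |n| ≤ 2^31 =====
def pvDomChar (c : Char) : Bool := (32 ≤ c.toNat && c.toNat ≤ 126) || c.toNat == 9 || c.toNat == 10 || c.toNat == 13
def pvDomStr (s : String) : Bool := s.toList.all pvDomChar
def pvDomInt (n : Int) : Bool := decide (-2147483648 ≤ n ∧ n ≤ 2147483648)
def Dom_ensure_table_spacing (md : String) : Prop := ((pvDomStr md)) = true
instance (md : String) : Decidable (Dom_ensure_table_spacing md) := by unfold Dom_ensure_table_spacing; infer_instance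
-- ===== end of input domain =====

-- B replaces A's append-then-pop splicing by a classify-then-emit pass with a pending-blank flag
-- (precomputed table flags, maximal table runs grouped, one blank owed instead of pushed and popped).

-- ===== PORT A =====
-- the accumulator `res` holds Python's `result` in REVERSE (append = cons, result[-1] = head)

-- `while result and result[-1] == "": result.pop()` on the reversed accumulator
def popBlanks : List String → List String
  | [] => []
  | h :: t => if h == "" then popBlanks t else h :: t

def tableLine (l : String) : Bool := PySem.Str.startswith (PySem.Str.strip l) "|"

def goA : List String → List String → List String
  | [], res => res
  | line :: rest, res =>
    if tableLine line && PySem.Str.isIn "|" line then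
      -- pop trailing blanks, then one separating blank if anything was emitted
      let res1 := popBlanks res
      let res2 := if res1.isEmpty then res1 else "" :: res1
      -- inner while: consume the run of table lines (line itself, then the run in rest)
      let res3 := (rest.takeWhile tableLine).reverse ++ line :: res2
      let res4 := popBlanks res3
      let rest' := rest.dropWhile tableLine
      let res5 := if rest'.isEmpty then res4 else "" :: res4
      goA rest' res5
    else if PySem.Str.strip line == "" then
      goA rest (match res with
                | [] => [""]
                | h :: t => if h == "" then h :: t else "" :: h :: t)
    else
      goA rest (line :: res)
termination_by lines => lines.length
decreasing_by
· exact Nat.lt_succ_of_le (List.length_dropWhile_le _ _)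
· exact Nat.lt_succ_self _
· exact Nat.lt_succ_self _

def ensure_table_spacing (md : String) : String :=
  PySem.Str.join "\n" (popBlanks (goA (PySem.Str.splitlines md) [])).reverse

-- ===== PORT B =====
-- `out` holds Python's `out` in REVERSE; `pending` = a blank line is owed before the next content

def goB : List (String × Bool) → List String → Bool → List String
  | [], out, _ => out
  | (line, tbl) :: rest, out, pending =>
    if tbl then
      let out1 := if out.isEmpty then out else "" :: out
      let block := (rest.takeWhile (·.2)).map (·.1)
      goB (rest.dropWhile (·.2)) (block.reverse ++ line :: out1) true
    else if PySem.Str.strip line == "" then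
      goB rest out true
    else
      goB rest (line :: (if pending then "" :: out else out)) false
termination_by flagged => flagged.length
decreasing_by
· exact Nat.lt_succ_of_le (List.length_dropWhile_le _ _)
· exact Nat.lt_succ_self _
· exact Nat.lt_succ_self _

def ensure_table_spacing_alt (md : String) : String :=
  let lines := PySem.Str.splitlines md
  let flagged := lines.map (fun l => (l, tableLine l))   -- the is_table list, paired with its line
  PySem.Str.join "\n" (goB flagged [] false).reverse

-- ===== PRECONDITION & SPEC =====
def Spec_ensure_table_spacing (md : String) (out : String) : Prop := out = ensure_table_spacing_alt md
instance (md : String) (out : String) : Decidable (Spec_ensure_table_spacing md out) := by unfold Spec_ensure_table_spacing; infer_instance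

-- ===== CLAIM (what is proved, stated in full; the proofs are below) =====
def Claim_equal_ensure_table_spacing : Prop := ∀ (md : String), Dom_ensure_table_spacing md → Spec_ensure_table_spacing md (ensure_table_spacing md)

-- ===== LEMMAS AND PROOFS =====

theorem tableLine_ne_blank {l : String} (h : tableLine l = true) : l ≠ "" := by
  intro he; subst he; exact absurd h (by decide)

theorem ne_blank_of_strip_ne {l : String} (h : ¬ PySem.Str.strip l = "") : l ≠ "" := by
  intro he; subst he; exact h rfl

-- a table line contains '|' (so A's redundant `"|" in line` conjunct is always true there)
theorem isIn_of_tableLine {l : String} (h : tableLine l = true) :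
    PySem.Str.isIn "|" l = true := by
  rw [PySem.Str.isIn_iff_infix]
  unfold tableLine at h
  rw [PySem.Str.startswith_eq, PySem.Str.toList_strip, PySem.Chars.startswith_iff] at h
  have hmem : '|' ∈ PySem.Chars.strip l.toList := h.mem (by simp)
  have hsub : (PySem.Chars.strip l.toList).Sublist l.toList := by
    unfold PySem.Chars.strip PySem.Chars.rstrip PySem.Chars.lstrip
    have h2 := (List.dropWhile_sublist (l := (List.dropWhile PySem.Chars.isspace l.toList).reverse)
      (p := PySem.Chars.isspace)).reverse
    simp only [List.reverse_reverse] at h2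
    exact h2.trans (List.dropWhile_sublist _)
  exact (List.singleton_infix_iff _ _).mpr (hsub.subset hmem)

theorem popBlanks_of_head {res : List String} (h : res.head? ≠ some "") :
    popBlanks res = res := by
  cases res with
  | nil => rfl
  | cons a t =>
    by_cases ha : a = ""
    · exact absurd (by simp [ha]) h
    · simp [popBlanks, ha]

-- the state A carries = B's state plus an owed blank line
def pblank (p : Bool) (out : List String) : List String := if p then "" :: out else out

theorem popBlanks_pblank {out : List String} (h : out.head? ≠ some "") (p : Bool) :
    popBlanks (pblank p out) = out := by
  cases p
  · simpa [pblank] using popBlanks_of_head h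
  · simp [pblank, popBlanks, popBlanks_of_head h]

theorem head_table_res {line : String} (ht : tableLine line = true) (rest res : List String) :
    ((rest.takeWhile tableLine).reverse ++ line :: res).head? ≠ some "" := by
  cases hr : (rest.takeWhile tableLine).reverse with
  | nil => simpa using tableLine_ne_blank ht
  | cons a t =>
    have ha : a ∈ rest.takeWhile tableLine := by
      have : a ∈ (rest.takeWhile tableLine).reverse := by rw [hr]; exact List.mem_cons_self
      simpa using this
    simpa using tableLine_ne_blank (List.mem_takeWhile_imp ha)

-- step equations for the two loops
theorem goA_table (line : String) (rest res : List String) (ht : tableLine line = true)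
    (hin : PySem.Str.isIn "|" line = true) :
    goA (line :: rest) res =
      goA (rest.dropWhile tableLine)
        (if (rest.dropWhile tableLine).isEmpty then
            popBlanks ((rest.takeWhile tableLine).reverse ++ line ::
              (if (popBlanks res).isEmpty then popBlanks res else "" :: popBlanks res))
         else "" :: popBlanks ((rest.takeWhile tableLine).reverse ++ line ::
              (if (popBlanks res).isEmpty then popBlanks res else "" :: popBlanks res))) := by
  rw [goA.eq_def]
  simp only [ht, hin, Bool.and_self, if_true]

theorem goA_blank (line : String) (rest res : List String) (ht : tableLine line = false)
    (hb : PySem.Str.strip line = "") :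
    goA (line :: rest) res =
      goA rest (match res with
                | [] => [""]
                | h :: t => if h == "" then h :: t else "" :: h :: t) := by
  rw [goA.eq_def]
  simp only [ht, Bool.false_and, Bool.false_eq_true, if_false, hb, beq_self_eq_true, if_true]

theorem goA_line (line : String) (rest res : List String) (ht : tableLine line = false)
    (hb : ¬ PySem.Str.strip line = "") :
    goA (line :: rest) res = goA rest (line :: res) := by
  rw [goA.eq_def]
  simp only [ht, Bool.false_and, Bool.false_eq_true, if_false, beq_iff_eq, if_neg hb]

theorem goB_table (line : String) (rest : List (String × Bool)) (out : List String) (p : Bool) :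
    goB ((line, true) :: rest) out p =
      goB (rest.dropWhile (·.2))
        (((rest.takeWhile (·.2)).map (·.1)).reverse ++
          line :: (if out.isEmpty then out else "" :: out)) true := by
  rw [goB.eq_def]
  rfl

theorem goB_blank (line : String) (rest : List (String × Bool)) (out : List String) (p : Bool)
    (hb : PySem.Str.strip line = "") :
    goB ((line, false) :: rest) out p = goB rest out true := by
  rw [goB.eq_def]
  simp only [Bool.false_eq_true, if_false, hb, beq_self_eq_true, if_true]


theorem goB_line (line : String) (rest : List (String × Bool)) (out : List String) (p : Bool)
    (hb : ¬ PySem.Str.strip line = "") :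
    goB ((line, false) :: rest) out p =
      goB rest (line :: (if p then "" :: out else out)) false := by
  rw [goB.eq_def]
  simp only [Bool.false_eq_true, if_false, beq_iff_eq, if_neg hb]

-- A's blank-line branch, started from a related state, just records the owed blank
theorem blank_step (out : List String) (p : Bool) (hout : out.head? ≠ some "") :
    (match pblank p out with
     | [] => [""]
     | h :: t => if h == "" then h :: t else "" :: h :: t) = pblank true out := by
  cases p with
  | true => simp [pblank]
  | false =>
    cases out with
    | nil => simp [pblank]
    | cons h t =>
      have : ¬ h = "" := fun he => hout (by simp [he])
      simp [pblank, this]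

-- the loop invariant: A's accumulator is B's accumulator plus the owed blank, and
-- B's accumulator never starts (reversed: ends) with a blank line
set_option maxHeartbeats 1000000 in
theorem main_lemma : ∀ (n : Nat) (lines : List String), lines.length ≤ n →
    ∀ (out : List String) (p : Bool), out.head? ≠ some "" →
    popBlanks (goA lines (pblank p out)) = goB (lines.map (fun l => (l, tableLine l))) out p ∧
    (goB (lines.map (fun l => (l, tableLine l))) out p).head? ≠ some "" := by
  intro n
  induction n with
  | zero =>
    intro lines hlen out p hout
    have : lines = [] := List.eq_nil_of_length_eq_zero (Nat.le_zero.mp hlen)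
    subst this
    exact ⟨by simp [goA, goB, popBlanks_pblank hout], by simpa [goB] using hout⟩
  | succ n ih =>
    intro lines hlen out p hout
    cases lines with
    | nil =>
      exact ⟨by simp [goA, goB, popBlanks_pblank hout], by simpa [goB] using hout⟩
    | cons line rest =>
      simp only [List.length_cons, Nat.succ_le_succ_iff] at hlen
      simp only [List.map_cons]
      by_cases ht : tableLine line = true
      · -- table run
        rw [ht, goA_table line rest _ ht (isIn_of_tableLine ht), goB_table,
          popBlanks_pblank hout]
        have hmapt : (List.map (fun l => (l, tableLine l)) rest).takeWhile (·.2) =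
            List.map (fun l => (l, tableLine l)) (rest.takeWhile tableLine) := by
          rw [List.takeWhile_map]; rfl
        have hmapd : (List.map (fun l => (l, tableLine l)) rest).dropWhile (·.2) =
            List.map (fun l => (l, tableLine l)) (rest.dropWhile tableLine) := by
          rw [List.dropWhile_map]; rfl
        have hfst : ((rest.takeWhile tableLine).map (fun l => (l, tableLine l))).map (·.1)
            = rest.takeWhile tableLine := by simp [Function.comp_def]
        rw [hmapt, hmapd, hfst]
        set res2 := if out.isEmpty then out else "" :: out with hres2
        set res3 := (rest.takeWhile tableLine).reverse ++ line :: res2 with hres3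
        have hhead3 : res3.head? ≠ some "" := head_table_res ht rest res2
        rw [popBlanks_of_head hhead3]
        by_cases hr : (rest.dropWhile tableLine).isEmpty
        · have hre : rest.dropWhile tableLine = [] := by simpa [List.isEmpty_iff] using hr
          rw [hre]
          simp only [List.map_nil, List.isEmpty_nil, if_true, goA, goB]
          exact ⟨popBlanks_of_head hhead3, hhead3⟩
        · rw [if_neg hr]
          have h := ih (rest.dropWhile tableLine) (le_trans (List.length_dropWhile_le _ _) hlen)
            res3 true hhead3
          simpa [pblank] using h
      · -- single non-table line
        have ht' : tableLine line = false := Bool.eq_false_iff.mpr ht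
        rw [ht']
        by_cases hb : PySem.Str.strip line = ""
        · rw [goA_blank line rest _ ht' hb, goB_blank line _ _ _ hb, blank_step out p hout]
          exact ih rest hlen out true hout
        · rw [goA_line line rest _ ht' hb, goB_line line _ _ _ hb]
          have hline : (line :: pblank p out).head? ≠ some "" := by
            simpa using ne_blank_of_strip_ne hb
          have h := ih rest hlen (line :: pblank p out) false hline
          simpa [pblank] using h

-- ===== VERDICT (by name: the statement is the Claim_ definition above) =====
theorem ensure_table_spacing_spec : Claim_equal_ensure_table_spacing := by
  intro md _
  unfold Spec_ensure_table_spacing ensure_table_spacing ensure_table_spacing_alt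
  have h := main_lemma (PySem.Str.splitlines md).length (PySem.Str.splitlines md) le_rfl [] false
    (by simp)
  rw [show pblank false [] = [] from rfl] at h
  rw [h.1]
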